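-- pv_equiv track=rewrite | github.com/ocriado91/JobSeeker | src/app.py | process_job_descriptions
-- ===== SOURCE A (Python) =====
-- def process_job_descriptions(job_descriptions: list, stack: list) -> dict:
--     """Method to retrieve keywords into job descriptions"""
--
--     skills = {}
--     for job_description in job_descriptions:
--         for tech_stack in stack:
--             if tech_stack in job_description:
--                 if tech_stack not in skills:
--                     skills[tech_stack] = 1
--                     continue
--                 skills[tech_stack] += 1
--
--     return skills
-- ===== SOURCE B (Python) =====
-- def process_job_descriptions(job_descriptions: list, stack: list) -> dict:
--     """Method to retrieve keywords into job descriptions"""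
--
--     matches = [kw for d in job_descriptions for kw in stack if kw in d]
--     return {kw: matches.count(kw) for kw in dict.fromkeys(matches)}
-- ===== Notes on version B (the rewrite author's own statement) =====
-- stated objective: idiomatic
-- what changed: Replaced the nested loops that conditionally create or increment dict entries with a flat comprehension of match events followed by a dict comprehension counting each distinct keyword with list.count.
import Mathlib
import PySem

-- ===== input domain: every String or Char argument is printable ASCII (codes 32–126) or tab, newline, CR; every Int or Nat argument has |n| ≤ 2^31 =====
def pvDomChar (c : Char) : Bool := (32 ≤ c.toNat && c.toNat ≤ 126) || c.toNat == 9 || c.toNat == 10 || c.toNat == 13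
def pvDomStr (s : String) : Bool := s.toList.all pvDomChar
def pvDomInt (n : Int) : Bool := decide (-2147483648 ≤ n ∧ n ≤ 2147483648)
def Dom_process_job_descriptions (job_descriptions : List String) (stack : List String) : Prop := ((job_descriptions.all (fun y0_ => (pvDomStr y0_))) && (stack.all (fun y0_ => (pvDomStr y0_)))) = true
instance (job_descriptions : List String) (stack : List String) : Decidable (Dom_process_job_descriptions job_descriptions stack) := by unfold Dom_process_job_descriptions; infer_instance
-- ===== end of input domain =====

-- B flattens all (description, keyword) match events into one list and builds the result by a
-- dict comprehension over the deduplicated events with list.count, instead of A's nested loops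
-- mutating a dict with a conditional create-or-increment (objective: idiomatic, not faster).

-- ===== PORT A =====
def process_job_descriptions (job_descriptions : List String) (stack : List String) : List (String × Int) :=
  (job_descriptions.foldl (fun (skills : PySem.Dict String Int) job_description =>
      stack.foldl (fun (sk : PySem.Dict String Int) tech_stack =>
        if PySem.Str.isIn tech_stack job_description then
          if sk.contains tech_stack = false then
            sk.insert tech_stack 1
          else
            -- skills[tech_stack] += 1 (key present on this branch)
            sk.insert tech_stack (sk.getD tech_stack 0 + 1)
        else sk) skills)
    PySem.Dict.empty).items

-- ===== PORT B =====
def process_job_descriptions_alt (job_descriptions : List String) (stack : List String) : List (String × Int) :=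
  -- evts = [kw for d in job_descriptions for kw in stack if kw in d]
  let evts : List String :=
    job_descriptions.flatMap (fun d => stack.filter (fun kw => PySem.Str.isIn kw d))
  -- {kw: evts.count(kw) for kw in dict.fromkeys(evts)}
  ((PySem.List.dedup evts).foldl
      (fun (skills : PySem.Dict String Int) kw =>
        skills.insert kw (evts.count kw : Int))
      PySem.Dict.empty).items

-- ===== PRECONDITION & SPEC =====
def Spec_process_job_descriptions (job_descriptions : List String) (stack : List String) (out : List (String × Int)) : Prop := out = process_job_descriptions_alt job_descriptions stack
instance (job_descriptions : List String) (stack : List String) (out : List (String × Int)) : Decidable (Spec_process_job_descriptions job_descriptions stack out) := by unfold Spec_process_job_descriptions; infer_instance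

-- ===== CLAIM =====
def Claim_equal_process_job_descriptions : Prop := ∀ (job_descriptions : List String) (stack : List String), Dom_process_job_descriptions job_descriptions stack → Spec_process_job_descriptions job_descriptions stack (process_job_descriptions job_descriptions stack)

-- ===== LEMMAS AND PROOFS =====

-- the flat list of (description, stack entry) match events, in A's processing order
def matchEvents (jds stack : List String) : List String :=
  jds.flatMap (fun d => stack.filter (fun kw => PySem.Str.isIn kw d))

-- A's double loop is the event-counting fold over the flattened match events
lemma A_fold_eq (jds stack : List String) :
    process_job_descriptions jds stack
      = ((matchEvents jds stack).foldl (fun d kw => d.insert kw (d.getD kw 0 + 1))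
          PySem.Dict.empty).items := by
  unfold process_job_descriptions matchEvents
  congr 1
  rw [List.foldl_flatMap]
  refine PySem.List.foldl_congr_mem _ _ _ _ ?_
  intro sk d _
  have hstep : (fun (sk : PySem.Dict String Int) tech_stack =>
      if PySem.Str.isIn tech_stack d then
        if sk.contains tech_stack = false then sk.insert tech_stack 1
        else sk.insert tech_stack (sk.getD tech_stack 0 + 1)
      else sk)
      = (fun (sk : PySem.Dict String Int) kw =>
        if PySem.Str.isIn kw d then sk.insert kw (sk.getD kw 0 + 1) else sk) := by
    funext sk kw
    by_cases hin : PySem.Str.isIn kw d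
    · rw [if_pos hin, if_pos hin]
      by_cases hc : sk.contains kw
      · rw [if_neg (by simp [hc])]
      · have hc' : sk.contains kw = false := by simpa using hc
        rw [if_pos hc', PySem.Dict.getD_of_not_contains sk 0 hc']
        norm_num
    · rw [if_neg hin, if_neg hin]
  rw [hstep,
    PySem.List.foldl_if_eq_foldl_filter (fun kw => PySem.Str.isIn kw d)
      (fun (sk : PySem.Dict String Int) kw => sk.insert kw (sk.getD kw 0 + 1)) stack sk]

-- a fold inserting g k for each key: final value is g k for every key in the list
lemma getD_foldl_insert_fun (g : String → Int) (l : List String)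
    (d : PySem.Dict String Int) (k : String) :
    (l.foldl (fun d x => d.insert x (g x)) d).getD k 0
      = if k ∈ l then g k else d.getD k 0 := by
  induction l generalizing d with
  | nil => simp
  | cons a t ih =>
    rw [List.foldl_cons, ih]
    by_cases hk : k ∈ t
    · simp [hk]
    · by_cases hka : k = a
      · subst hka
        simp [hk]
      · simp [hk, hka, PySem.Dict.getD_insert]

lemma items_fold (m : List String) :
    ((PySem.List.dedup m).foldl
        (fun (d : PySem.Dict String Int) kw => d.insert kw (m.count kw : Int))
        PySem.Dict.empty).items
      = (PySem.Set.ofList m).map (fun k => (k, (m.count k : Int))) := by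
  have hkeys : ((PySem.List.dedup m).foldl
      (fun (d : PySem.Dict String Int) kw => d.insert kw (m.count kw : Int))
      PySem.Dict.empty).keys = PySem.Set.ofList m := by
    have h := PySem.Dict.keys_foldl_insert_key (PySem.List.dedup m) (fun x => x)
      (fun (d : PySem.Dict String Int) kw => (m.count kw : Int)) PySem.Dict.empty
    simp only [List.map_id'] at h
    rw [h, PySem.Dict.keys_empty, PySem.Set.update_nil_left, PySem.List.dedup_eq_ofList,
      PySem.Set.ofList_ofList]
  have hnd : ((PySem.List.dedup m).foldl
      (fun (d : PySem.Dict String Int) kw => d.insert kw (m.count kw : Int))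
      PySem.Dict.empty).keys.Nodup := by
    rw [hkeys]; exact PySem.Set.nodup_ofList m
  rw [PySem.Dict.items_eq_map_keys _ hnd 0, hkeys]
  apply List.map_congr_left
  intro k hk
  have hmem : k ∈ PySem.List.dedup m := by
    rw [PySem.List.dedup_eq_ofList]; exact hk
  rw [getD_foldl_insert_fun (fun kw => (m.count kw : Int)) (PySem.List.dedup m)
    PySem.Dict.empty k, if_pos hmem]

lemma B_char (jds stack : List String) :
    process_job_descriptions_alt jds stack
      = (PySem.Set.ofList (matchEvents jds stack)).map
          (fun k => (k, ((matchEvents jds stack).count k : Int))) :=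
  items_fold (matchEvents jds stack)

-- ===== VERDICT =====
theorem process_job_descriptions_spec : Claim_equal_process_job_descriptions := by
  intro jds stack _
  unfold Spec_process_job_descriptions
  rw [A_fold_eq, PySem.Dict.foldl_insert_getD_add_one_eq_counter, PySem.Dict.items_counter,
    B_char]
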